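-- pv_equiv track=rewrite | github.com/stefanschenk/advent-of-code-2024 | day-9/part_two.py | index_blocks
-- ===== SOURCE A (Python) =====
-- from itertools import groupby, repeat, chain
--
-- def index_blocks(blocks: list[str]):
--     last_block_idx = 0
--     indexed_blocks = dict()
--
--     for k,g in groupby(blocks):
--         g = list(g)
--         blockIdx = blocks.index(g[0], last_block_idx)
--         indexed_blocks.update({blockIdx:g})
--         last_block_idx = blockIdx + len(g)
--
--     return indexed_blocks
-- ===== SOURCE B (Python) =====
-- def index_blocks(blocks: list[str]):
--     n = len(blocks)
--     starts = [i for i in range(n) if i == 0 or blocks[i - 1] != blocks[i]]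
--     ends = starts[1:] + [n]
--     return {s: blocks[s:e] for s, e in zip(starts, ends)}
-- ===== Notes on version B (the rewrite author's own statement) =====
-- stated objective: alternative
-- what changed: Instead of groupby with a blocks.index scan per group, B first computes the list of run-boundary indices (where an element differs from its predecessor), then builds the dict by slicing blocks between consecutive boundaries.
import Mathlib
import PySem

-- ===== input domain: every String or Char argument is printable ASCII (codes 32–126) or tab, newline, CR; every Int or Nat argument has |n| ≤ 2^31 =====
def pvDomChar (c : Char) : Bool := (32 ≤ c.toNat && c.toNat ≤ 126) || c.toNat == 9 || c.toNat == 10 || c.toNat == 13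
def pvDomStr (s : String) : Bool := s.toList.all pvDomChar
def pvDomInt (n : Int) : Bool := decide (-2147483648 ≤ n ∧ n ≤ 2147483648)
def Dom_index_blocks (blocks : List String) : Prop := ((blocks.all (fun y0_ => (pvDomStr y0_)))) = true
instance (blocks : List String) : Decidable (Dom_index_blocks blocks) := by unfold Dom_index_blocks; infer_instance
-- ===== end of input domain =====

-- B replaces groupby + blocks.index with two staged passes: first the list of run-boundary
-- indices, then slicing blocks between consecutive boundaries (alternative decomposition, same cost).

-- ===== PORT A =====
-- itertools.groupby (keys only implicit: consecutive runs of equal elements, each run nonempty)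
def pyGroupby (xs : List String) : List (List String) :=
  match xs with
  | [] => []
  | x :: rest =>
      (x :: rest.takeWhile (fun y => y == x)) :: pyGroupby (rest.dropWhile (fun y => y == x))
termination_by xs.length
decreasing_by
  simp only [List.length_cons]
  exact Nat.lt_succ_of_le (List.length_dropWhile_le _ _)

-- exact port of list.index(x, start): scan from offset s; none = ValueError (never reached by A)
def findFrom (x : String) : List String → Nat → Option Nat
  | [], _ => none
  | y :: ys, i => if y == x then some i else findFrom x ys (i + 1)

def indexFrom (xs : List String) (x : String) (s : Nat) : Option Nat :=
  findFrom x (xs.drop s) s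

def index_blocks (blocks : List String) : List (Int × List String) :=
  (((pyGroupby blocks).foldl
      (fun (st : Nat × PySem.Dict Int (List String)) g =>
        match g with
        | [] => st          -- unreachable: groupby groups are nonempty
        | h :: _ =>
          match indexFrom blocks h st.1 with
          | none => st      -- unreachable: Python would raise ValueError here
          | some i => (i + g.length, st.2.insert (i : Int) g))
      (0, PySem.Dict.empty)).2).items

-- ===== PORT B =====
-- the comprehension's condition: 'i == 0 or blocks[i-1] != blocks[i]' (indices always in range)
def bcond (xs : List String) (i : Nat) : Bool :=
  i == 0 || xs.getD (i - 1) "" != xs.getD i ""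

-- 'starts = [i for i in range(n) if ...]'
def boundaries (xs : List String) : List Nat :=
  (List.range xs.length).filter (bcond xs)

def index_blocks_alt (blocks : List String) : List (Int × List String) :=
  let n := blocks.length
  let starts := boundaries blocks
  -- starts[1:] on a list of non-negative indices is exactly drop 1
  let ends := starts.drop 1 ++ [n]
  (starts.zip ends).map (fun p =>
    ((p.1 : Int), PySem.List.slice blocks (some (p.1 : Int)) (some (p.2 : Int))))

-- ===== PRECONDITION & SPEC =====
def Spec_index_blocks (blocks : List String) (out : List (Int × List String)) : Prop := out = index_blocks_alt blocks
instance (blocks : List String) (out : List (Int × List String)) : Decidable (Spec_index_blocks blocks out) := by unfold Spec_index_blocks; infer_instance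

-- ===== CLAIM (what is proved, stated in full; the proofs are below) =====
def Claim_equal_index_blocks : Prop := ∀ (blocks : List String), Dom_index_blocks blocks → Spec_index_blocks blocks (index_blocks blocks)

-- ===== LEMMAS AND PROOFS =====

-- canonical form both ports are reduced to
def runsWithStarts (rs : List (List String)) (s : Nat) : List (Int × List String) :=
  match rs with
  | [] => []
  | g :: gs => ((s : Int), g) :: runsWithStarts gs (s + g.length)

-- the start indices of the runs
def startsList (rs : List (List String)) (s : Nat) : List Nat :=
  match rs with
  | [] => []
  | g :: gs => s :: startsList gs (s + g.length)

theorem pyGroupby_flatten (xs : List String) : (pyGroupby xs).flatten = xs := by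
  induction xs using pyGroupby.induct with
  | case1 => simp [pyGroupby]
  | case2 x rest ih =>
      simp [pyGroupby, ih, List.takeWhile_append_dropWhile]

theorem pyGroupby_nonempty (xs : List String) :
    ∀ g ∈ pyGroupby xs, g ≠ [] := by
  induction xs using pyGroupby.induct with
  | case1 => simp [pyGroupby]
  | case2 x rest ih =>
      intro g hg
      simp only [pyGroupby, List.mem_cons] at hg
      rcases hg with h | h
      · simp [h]
      · exact ih g h

theorem indexFrom_head {xs t : List String} {x : String} {s : Nat}
    (h : xs.drop s = x :: t) : indexFrom xs x s = some s := by
  simp [indexFrom, h, findFrom]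

-- A's fold invariant
theorem A_fold (rs : List (List String)) :
    ∀ (blocks : List String) (s : Nat) (d : PySem.Dict Int (List String)),
    blocks.drop s = rs.flatten →
    (∀ g ∈ rs, g ≠ []) →
    (∀ k ∈ d.keys, k < (s : Int)) →
    (rs.foldl
      (fun (st : Nat × PySem.Dict Int (List String)) g =>
        match g with
        | [] => st
        | h :: _ =>
          match indexFrom blocks h st.1 with
          | none => st
          | some i => (i + g.length, st.2.insert (i : Int) g))
      (s, d)).2.items = d.items ++ runsWithStarts rs s := by
  induction rs with
  | nil => intro blocks s d _ _ _; simp [runsWithStarts]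
  | cons g gs ih =>
      intro blocks s d hdrop hne hkeys
      obtain ⟨h, t, rfl⟩ : ∃ h t, g = h :: t := by
        cases g with
        | nil => exact absurd rfl (hne _ (by simp))
        | cons h t => exact ⟨h, t, rfl⟩
      have hflat : blocks.drop s = h :: (t ++ gs.flatten) := by
        simpa [List.flatten] using hdrop
      have hidx : indexFrom blocks h s = some s := indexFrom_head hflat
      have hnc : d.contains ((s : Int)) = false := by
        rcases hcc : d.contains ((s : Int)) with _ | _
        · rfl
        · exfalso
          have hm : (s : Int) ∈ d.keys :=
            (PySem.Dict.contains_iff_mem_keys _ _).mp hcc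
          exact absurd (hkeys _ hm) (lt_irrefl _)
      have hins := PySem.Dict.items_insert_of_not_contains (d := d)
        (k := (s : Int)) (v := h :: t) hnc
      have hdrop' : blocks.drop (s + (h :: t).length) = gs.flatten := by
        rw [← List.drop_drop, hflat]
        simp
      have hkeys' : ∀ k ∈ (d.insert (s : Int) (h :: t)).keys,
          k < ((s + (h :: t).length : Nat) : Int) := by
        intro k hk
        rcases (PySem.Dict.mem_keys_insert _ _ _ _).mp hk with rfl | hk'
        · simp only [List.length_cons]; push_cast; omega
        · have := hkeys _ hk'
          have : k < (s : Int) := this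
          push_cast
          omega
      have := ih blocks (s + (h :: t).length) (d.insert (s : Int) (h :: t))
        hdrop' (fun g hg => hne g (by simp [hg])) hkeys'
      simp only [List.foldl_cons, hidx]
      rw [this, hins]
      simp [runsWithStarts]

theorem A_eq_runs (blocks : List String) :
    index_blocks blocks = runsWithStarts (pyGroupby blocks) 0 := by
  unfold index_blocks
  rw [A_fold (pyGroupby blocks) blocks 0 PySem.Dict.empty
      (by simpa using (pyGroupby_flatten blocks).symm)
      (pyGroupby_nonempty blocks)
      (by simp [PySem.Dict.empty])]
  simp [PySem.Dict.empty]

-- B side -------------------------------------------------------------------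

-- boundaries of a constant run is just [0]
theorem boundaries_const (x : String) (t : List String)
    (ht : ∀ y ∈ t, y = x) : boundaries (x :: t) = [0] := by
  have hget : ∀ i, i < (x :: t).length → (x :: t).getD i "" = x := by
    intro i hi
    cases i with
    | zero => rfl
    | succ j =>
        simp only [List.length_cons, Nat.succ_lt_succ_iff] at hi
        simp only [List.getD_cons_succ]
        rw [List.getD_eq_getElem _ _ hi]
        exact ht _ (List.getElem_mem hi)
  unfold boundaries
  rw [show (x :: t).length = t.length + 1 from rfl, List.range_succ_eq_map]
  simp only [List.filter_cons, List.filter_map]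
  have h0 : bcond (x :: t) 0 = true := by simp [bcond]
  rw [if_pos h0]
  have hnil : (List.range t.length).filter (bcond (x :: t) ∘ Nat.succ) = [] := by
    apply List.filter_eq_nil_iff.mpr
    intro i hi
    simp only [List.mem_range] at hi
    have e1 : (x :: t).getD i "" = x := hget i (by simp; omega)
    have e2 : (x :: t).getD (i + 1) "" = x := hget (i + 1) (by simp; omega)
    simp only [Function.comp_apply, Nat.succ_eq_add_one, bcond, Nat.add_sub_cancel]
    rw [e1, e2]
    simp
  rw [hnil]
  simp

-- bcond agrees across an append, first part
theorem bcond_append_left (p xs : List String) (i : Nat) (hi : i < p.length) :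
    bcond (p ++ xs) i = bcond p i := by
  cases i with
  | zero => simp [bcond]
  | succ j =>
      have h1 : j < p.length := by omega
      simp only [bcond, Nat.succ_sub_one]
      rw [List.getD_append _ _ _ _ hi, List.getD_append _ _ _ _ h1]

-- bcond agrees across an append, second part (given the runs really break at the seam)
theorem bcond_append_right (p : List String) (x : String) (xs : List String) (i : Nat)
    (hp : p ≠ []) (hlast : p.getLast hp ≠ x) :
    bcond (p ++ x :: xs) (p.length + i) = bcond (x :: xs) i := by
  cases i with
  | zero =>
      have hlen : 0 < p.length := List.length_pos_iff.mpr hp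
      have e2 : (p ++ x :: xs).getD p.length "" = x := by
        rw [List.getD_append_right _ _ _ _ (le_refl _)]
        simp
      have e1 : (p ++ x :: xs).getD (p.length - 1) "" = p.getLast hp := by
        rw [List.getD_append _ _ _ _ (by omega)]
        rw [List.getD_eq_getElem _ _ (by omega)]
        exact (List.getLast_eq_getElem hp).symm
      simp only [bcond, Nat.add_zero, e2, e1]
      simp [bne, hlast]
  | succ j =>
      have e1 : (p ++ x :: xs).getD (p.length + j) "" = (x :: xs).getD j "" := by
        rw [List.getD_append_right _ _ _ _ (by omega)]
        simp
      have e2 : (p ++ x :: xs).getD (p.length + (j + 1)) "" = (x :: xs).getD (j + 1) "" := by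
        rw [List.getD_append_right _ _ _ _ (by omega)]
        simp
      simp only [bcond, show p.length + (j + 1) - 1 = p.length + j from by omega,
        Nat.add_sub_cancel, e1, e2]
      simp

-- splitting boundaries at a genuine run seam
theorem boundaries_append (p : List String) (x : String) (xs : List String)
    (hp : p ≠ []) (hlast : p.getLast hp ≠ x) :
    boundaries (p ++ x :: xs) =
      boundaries p ++ (boundaries (x :: xs)).map (p.length + ·) := by
  unfold boundaries
  rw [List.length_append, List.range_add, List.filter_append]
  congr 1
  · apply List.filter_congr
    intro i hi
    exact bcond_append_left p (x :: xs) i (List.mem_range.mp hi)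
  · rw [List.filter_map]
    congr 1
    apply List.filter_congr
    intro i hi
    simpa [Function.comp] using bcond_append_right p x xs i hp hlast

theorem startsList_shift (rs : List (List String)) (a : Nat) :
    ∀ s, (startsList rs s).map (a + ·) = startsList rs (a + s) := by
  induction rs with
  | nil => intro s; simp [startsList]
  | cons g gs ih =>
      intro s
      simp only [startsList, List.map_cons, ih (s + g.length), Nat.add_assoc]

theorem boundaries_eq_starts (xs : List String) :
    boundaries xs = startsList (pyGroupby xs) 0 := by
  induction xs using pyGroupby.induct with
  | case1 => simp [boundaries, startsList, pyGroupby]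
  | case2 x rest ih =>
      have hsplit : x :: rest =
          (x :: rest.takeWhile (fun y => y == x)) ++ rest.dropWhile (fun y => y == x) := by
        simp [List.takeWhile_append_dropWhile]
      set p := x :: rest.takeWhile (fun y => y == x) with hpdef
      have hp : p ≠ [] := by simp [hpdef]
      have hpconst : ∀ y ∈ p, y = x := by
        intro y hy
        rcases List.mem_cons.mp hy with rfl | hy'
        · rfl
        · have := List.mem_takeWhile_imp hy'
          simpa using this
      have hbp : boundaries p = [0] :=
        boundaries_const x _ (fun y hy => hpconst y (by simp [hpdef, hy]))
      rcases hd : rest.dropWhile (fun y => y == x) with _ | ⟨h, t⟩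
      · rw [show x :: rest = p from by rw [hsplit, hd, List.append_nil]]
        rw [hbp]
        have : pyGroupby p = [p] := by
          rw [hpdef]
          simp only [pyGroupby]
          have : (rest.takeWhile (fun y => y == x)).takeWhile (fun y => y == x)
              = rest.takeWhile (fun y => y == x) := by
            apply List.takeWhile_eq_self_iff.mpr
            intro y hy
            exact List.mem_takeWhile_imp (p := fun y => y == x) (l := rest) hy
          have hdw : (rest.takeWhile (fun y => y == x)).dropWhile (fun y => y == x) = [] := by
            apply List.dropWhile_eq_nil_iff.mpr
            intro y hy
            exact List.mem_takeWhile_imp (p := fun y => y == x) (l := rest) hy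
          rw [this, hdw]
          simp [pyGroupby]
        simp [this, startsList]
      · have hlast : p.getLast hp ≠ h := by
          have hmem := List.getLast_mem hp
          have hx : p.getLast hp = x := hpconst _ hmem
          have : (h == x) = false := by
            have := List.head_dropWhile_not (fun y => y == x) (l := rest) (by simp [hd])
            simpa [hd] using this
          rw [hx]
          intro hc
          simp [← hc] at this
        have hibs : boundaries (rest.dropWhile (fun y => y == x))
            = startsList (pyGroupby (rest.dropWhile (fun y => y == x))) 0 := ih
        have this2 : pyGroupby (x :: rest) =
            p :: pyGroupby (rest.dropWhile (fun y => y == x)) := by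
          simp [pyGroupby, hpdef]
        rw [hsplit, hd, boundaries_append p h t hp hlast, hbp, ← hd, hibs,
          startsList_shift, ← hsplit, this2]
        simp [startsList]

-- zipping consecutive boundaries and slicing yields the runs
theorem zip_slice_eq_runs (rs : List (List String)) :
    ∀ (blocks : List String) (s : Nat),
    blocks.drop s = rs.flatten →
    (∀ g ∈ rs, g ≠ []) →
    ((startsList rs s).zip ((startsList rs s).drop 1 ++ [blocks.length])).map (fun p =>
      ((p.1 : Int), PySem.List.slice blocks (some (p.1 : Int)) (some (p.2 : Int))))
      = runsWithStarts rs s := by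
  induction rs with
  | nil => intro blocks s _ _; simp [startsList, runsWithStarts]
  | cons g gs ih =>
      intro blocks s hdrop hne
      have hdrop' : blocks.drop (s + g.length) = gs.flatten := by
        rw [← List.drop_drop, hdrop]
        simp [List.flatten]
      have hslice : PySem.List.slice blocks (some (s : Int))
          (some ((s + g.length : Nat) : Int)) = g := by
        rw [PySem.List.slice_natCast, hdrop]
        simp [List.flatten, List.take_left']
      cases gs with
      | nil =>
          have hlen : blocks.length = s + g.length := by
            have h1 : blocks.drop s = g := by simpa [List.flatten] using hdrop
            have h2 := congrArg List.length h1
            simp only [List.length_drop] at h2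
            have hg : 0 < g.length := List.length_pos_iff.mpr (hne g (by simp))
            omega
          simp only [startsList, List.drop_one, List.tail_cons, List.nil_append,
            List.zip_cons_cons, List.zip_nil_right, List.map_cons, List.map_nil,
            runsWithStarts]
          rw [hlen]
          rw [hslice]
      | cons g' gs' =>
          simp only [startsList, List.drop_one, List.tail_cons, List.cons_append,
            List.zip_cons_cons, List.map_cons, runsWithStarts]
          rw [hslice]
          have := ih blocks (s + g.length) hdrop' (fun g hg => hne g (by simp [hg]))
          simp only [startsList, List.drop_one, List.tail_cons] at this
          rw [this]
          simp [runsWithStarts]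

theorem B_eq_runs (blocks : List String) :
    index_blocks_alt blocks = runsWithStarts (pyGroupby blocks) 0 := by
  unfold index_blocks_alt
  rw [boundaries_eq_starts]
  exact zip_slice_eq_runs (pyGroupby blocks) blocks 0
    (by simpa using (pyGroupby_flatten blocks).symm)
    (pyGroupby_nonempty blocks)

-- ===== VERDICT (by name: the statement is the Claim_ definition above) =====
theorem index_blocks_spec : Claim_equal_index_blocks := by
  intro blocks _
  unfold Spec_index_blocks
  rw [A_eq_runs, B_eq_runs]
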